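-- pv_equiv track=rewrite | github.com/portkeyss/cb2 | 1998-gcd-sort-of-an-array/1998-gcd-sort-of-an-array.py | gcdSort
-- ===== SOURCE A (Python) =====
-- from typing import List
--
-- def gcdSort(nums: List[int]) -> bool:
--     #union find
--     n = max(nums)+1
--     rank = [0]*n
--     parent = [-1]*n
--     def find(x):
--         if parent[x]==-1: return x
--         parent[x] = find(parent[x])
--         return parent[x]
--
--     def union(x,y):
--         x = find(x)
--         y = find(y)
--         if x==y: return
--         if rank[x]>rank[y]:
--             parent[y] = x
--         elif rank[x]<rank[y]:
--             parent[x] = y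
--         else:
--             parent[x] = y
--             rank[y] += 1
--
--     #sieve smallest prime factors
--     spf = [i for i in range(n)]
--     for i in range(2,n):
--         if spf[i]!=i: continue
--         for j in range(i*i, n, i):
--             if spf[j]==j:
--                 spf[j] = i
--
--     def getPrimeFactors(num):
--         while num>1:
--             yield spf[num]
--             num //= spf[num]
--
--     for x in nums:
--         for pf in getPrimeFactors(x):
--             union(x,pf)
--
--     for x,y in zip(nums,sorted(nums)):
--         if find(x)!=find(y):
--             return False
--     return True
-- ===== SOURCE B (Python) =====
-- from typing import List
--
-- def gcdSort(nums: List[int]) -> bool: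
--     n = max(nums) + 1
--     # smallest-prime-factor sieve (same sieve as the original)
--     spf = [i for i in range(n)]
--     for i in range(2, n):
--         if spf[i] != i: continue
--         for j in range(i * i, n, i):
--             if spf[j] == j:
--                 spf[j] = i
--     # components by label relabelling instead of union-find:
--     # comp maps every node 0..n-1 to its component label
--     comp = {v: v for v in range(n)}
--     for x in nums:
--         num = x
--         while num > 1:
--             p = spf[num]
--             ca, cb = comp[x], comp[p]
--             if ca != cb:
--                 comp = {v: (ca if c == cb else c) for v, c in comp.items()}
--             num //= p
--     return all(comp[x] == comp[y] for x, y in zip(nums, sorted(nums)))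
-- ===== Notes on version B (the rewrite author's own statement) =====
-- stated objective: alternative
-- what changed: Replaces the union-find (path compression + rank) by an explicit component-label map that is relabelled on each merge, and the early-return comparison loop by an all() over the zipped pairs; the SPF sieve is kept.
-- outside the precondition, e.g. on gcdSort([3, -1]): A returns False, B raises KeyError; on gcdSort([-1, 3]): A returns True, B raises KeyError
import Mathlib
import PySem

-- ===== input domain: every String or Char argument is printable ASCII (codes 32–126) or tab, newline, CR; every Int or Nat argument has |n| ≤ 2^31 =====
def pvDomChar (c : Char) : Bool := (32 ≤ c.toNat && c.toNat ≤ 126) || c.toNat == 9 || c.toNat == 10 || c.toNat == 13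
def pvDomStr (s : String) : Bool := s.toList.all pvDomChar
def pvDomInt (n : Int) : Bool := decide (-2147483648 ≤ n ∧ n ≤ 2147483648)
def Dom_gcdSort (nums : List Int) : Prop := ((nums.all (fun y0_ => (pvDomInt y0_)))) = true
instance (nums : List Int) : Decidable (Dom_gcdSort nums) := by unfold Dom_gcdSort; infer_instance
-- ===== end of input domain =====

-- B replaces A's union-find by an explicit component-label map relabelled on each merge
-- (same SPF sieve); equivalence is about the return value.

-- Python's integer-indexed lists/dicts are held as Lean Arrays for O(1) access.
-- aget/aset are exact for Python list indexing at indices 0 <= i < size; every access the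
-- ports make on inputs admitted by Pre_ is in that range (established by the proofs below).
def aget (a : Array Int) (i : Int) : Int := if 0 ≤ i then a.getD i.toNat 0 else 0
def aset (a : Array Int) (i : Int) (v : Int) : Array Int :=
  if 0 ≤ i then a.setIfInBounds i.toNat v else a

-- ===== PORT A =====
-- find(x) with path compression.  Python's recursion carries no bound; the Nat fuel is
-- only the termination device (instantiated with the parent array size, which exceeds every
-- parent-chain length, so the fuel-0 branch is never taken on admitted inputs).
-- Returns (root, updated parent).
def findA : Nat → Array Int → Int → Int × Array Int
  | 0, par, x => (x, par)
  | f+1, par, x =>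
      let p := aget par x
      if p = -1 then (x, par)
      else
        let rp := findA f par p
        let par2 := aset rp.2 x rp.1
        (aget par2 x, par2)

-- union(x, y) on the state (rank, parent)
def unionA (rank par : Array Int) (x y : Int) : Array Int × Array Int :=
  let fx := findA par.size par x
  let fy := findA fx.2.size fx.2 y
  let x1 := fx.1
  let y1 := fy.1
  let par1 := fy.2
  if x1 = y1 then (rank, par1)
  else if aget rank x1 > aget rank y1 then
    (rank, aset par1 y1 x1)
  else if aget rank x1 < aget rank y1 then
    (rank, aset par1 x1 y1)
  else
    (aset rank y1 (aget rank y1 + 1), aset par1 x1 y1)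

-- the smallest-prime-factor sieve
def sieveA (n : Int) : Array Int :=
  (PySem.List.pyRange 2 n 1).foldl (fun spf i =>
      if aget spf i ≠ i then spf
      else (PySem.List.pyRange (i*i) n i).foldl (fun s j =>
          if aget s j = j then aset s j i else s) spf)
    (PySem.List.pyRange 0 n 1).toArray

-- 'for pf in getPrimeFactors(x): union(x, pf)', i.e. while num > 1: union(x, spf[num]); num //= spf[num].
-- Fuel x.toNat+1 bounds the while loop (num starts at x and strictly decreases while > 1).
def factorUnionA (spf : Array Int) : Nat → Array Int × Array Int → Int → Int → Array Int × Array Int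
  | 0, st, _, _ => st
  | f+1, st, x, num =>
      if 1 < num then
        let pf := aget spf num
        factorUnionA spf f (unionA st.1 st.2 x pf) x (PySem.Int.floordiv num pf)
      else st

-- 'for x, y in zip(nums, sorted(nums)): if find(x) != find(y): return False / return True'
def checkA : List (Int × Int) → Array Int → Bool
  | [], _ => true
  | (x, y) :: rest, par =>
      let fx := findA par.size par x
      let fy := findA fx.2.size fx.2 y
      if fx.1 ≠ fy.1 then false else checkA rest fy.2

def gcdSort (nums : List Int) : Bool :=
  let n : Int := ((PySem.List.max? nums (fun v => v)).getD 0) + 1  -- max(nums) raises on []; Pre_ excludes that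
  let rank := Array.replicate n.toNat 0  -- [0]*n ([0]*n = [] for n <= 0, as toNat clamps)
  let par0 := Array.replicate n.toNat (-1 : Int)  -- [-1]*n
  let spf := sieveA n
  let st := nums.foldl (fun st x => factorUnionA spf (x.toNat + 1) st x x) (rank, par0)
  checkA (nums.zip (PySem.List.sorted nums (fun v => v))) st.2

-- ===== PORT B =====
-- B keeps the same sieve
def sieveB (n : Int) : Array Int :=
  (PySem.List.pyRange 2 n 1).foldl (fun spf i =>
      if aget spf i ≠ i then spf
      else (PySem.List.pyRange (i*i) n i).foldl (fun s j =>
          if aget s j = j then aset s j i else s) spf)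
    (PySem.List.pyRange 0 n 1).toArray

-- merge the classes of x and p in the label map: relabel every node labelled comp[p] to comp[x].
-- Python's comp is a dict with keys exactly 0..n-1; it is held positionally (slot v = comp[v]),
-- so the dict comprehension over comp.items (keys unchanged) is a map over the values.
def mergeB (comp : Array Int) (x p : Int) : Array Int :=
  let ca := aget comp x
  let cb := aget comp p
  if ca ≠ cb then
    comp.map (fun c => if c = cb then ca else c)
  else comp

-- while num > 1: merge(x, spf[num]); num //= spf[num]   (same fuel device as in port A)
def factorMergeB (spf : Array Int) : Nat → Array Int → Int → Int → Array Int
  | 0, comp, _, _ => comp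
  | f+1, comp, x, num =>
      if 1 < num then
        let p := aget spf num
        factorMergeB spf f (mergeB comp x p) x (PySem.Int.floordiv num p)
      else comp

def gcdSort_alt (nums : List Int) : Bool :=
  let n : Int := ((PySem.List.max? nums (fun v => v)).getD 0) + 1
  let spf := sieveB n
  let comp0 := ((PySem.List.pyRange 0 n 1).map (fun v => v)).toArray  -- {v: v for v in range(n)}, key v at slot v
  let comp := nums.foldl (fun c x => factorMergeB spf (x.toNat + 1) c x x) comp0
  (nums.zip (PySem.List.sorted nums (fun v => v))).all
    (fun xy => aget comp xy.1 == aget comp xy.2)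

-- ===== PRECONDITION & SPEC =====
-- Pre_ excludes the empty list (A's max() raises ValueError; B raises too) and lists
-- containing a negative number, where A's value is an accident of Python's negative-index
-- wraparound (A raises IndexError for most negatives) and B raises KeyError.
def Pre_gcdSort (nums : List Int) : Prop := nums ≠ [] ∧ ∀ x ∈ nums, 0 ≤ x
instance (nums : List Int) : Decidable (Pre_gcdSort nums) := by unfold Pre_gcdSort; infer_instance

def pvWitness_gcdSort : List Int := [10, 5, 9, 3, 7]

def Spec_gcdSort (nums : List Int) (out : Bool) : Prop := out = gcdSort_alt nums
instance (nums : List Int) (out : Bool) : Decidable (Spec_gcdSort nums out) := by unfold Spec_gcdSort; infer_instance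

-- ===== CLAIM (what is proved, stated in full; the proofs are below) =====
def Claim_equal_gcdSort : Prop := ∀ (nums : List Int), Dom_gcdSort nums → Pre_gcdSort nums → Spec_gcdSort nums (gcdSort nums)


-- ===== LEMMAS AND PROOFS =====

-- parent[x] (all indices used below are in range, so the default never shows)
def pg (par : Array Int) (x : Int) : Int := aget par x

-- "following parent pointers from x for exactly k steps ends at the root r"
inductive ReachN (par : Array Int) : Nat → Int → Int → Prop
  | root (x : Int) (h0 : 0 ≤ x) (h1 : x < (par.size : Int)) (hr : pg par x = -1) :
      ReachN par 0 x x
  | step (x r : Int) (k : Nat) (h0 : 0 ≤ x) (h1 : x < (par.size : Int)) (hp : pg par x ≠ -1)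
      (hrec : ReachN par k (pg par x) r) : ReachN par (k+1) x r

def RootOf (par : Array Int) (x r : Int) : Prop := ∃ k, ReachN par k x r

def SameRoot (par : Array Int) (u v : Int) : Prop := ∃ r, RootOf par u r ∧ RootOf par v r

def Wf (par : Array Int) : Prop :=
  ∀ x : Int, 0 ≤ x → x < (par.size : Int) → ∃ r, RootOf par x r

-- the coupling invariant: the union-find forest par and the label map g induce the
-- same partition of the nodes 0..N-1
def INV (N : Nat) (par : Array Int) (g : Int → Int) : Prop :=
  par.size = N ∧ Wf par ∧
  ∀ u v : Int, 0 ≤ u → u < (N : Int) → 0 ≤ v → v < (N : Int) →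
    (SameRoot par u v ↔ g u = g v)

-- what one merge does to the label map
def gmerge (g : Int → Int) (x y : Int) : Int → Int :=
  fun u => if g x = g y then g u else if g u = g y then g x else g u

-- B's dict with keys 0..n-1 and value map g, held positionally
def reprA (n : Int) (g : Int → Int) : Array Int :=
  ((PySem.List.pyRange 0 n 1).map g).toArray

def spfOK (spf : Array Int) (n : Int) : Prop :=
  ∀ m : Int, 1 < m → m < n → 2 ≤ pg spf m ∧ pg spf m ≤ m

theorem size_aset (a : Array Int) (i : Int) (v : Int) : (aset a i v).size = a.size := by
  unfold aset; split <;> simp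

theorem aget_eq_getElem (a : Array Int) (i : Int) (h0 : 0 ≤ i) (h1 : i.toNat < a.size) :
    aget a i = a[i.toNat] := by
  unfold aget
  rw [if_pos h0, Array.getD_eq_getD_getElem?, Array.getElem?_eq_getElem h1]
  rfl

theorem aget_of_oob (a : Array Int) (i : Int) (h0 : 0 ≤ i) (h1 : ¬ i.toNat < a.size) :
    aget a i = 0 := by
  unfold aget
  rw [if_pos h0, Array.getD_eq_getD_getElem?, Array.getElem?_eq_none (by omega)]
  rfl

theorem pg_set_self (par : Array Int) (x v : Int) (h0 : 0 ≤ x) (h1 : x < (par.size : Int)) :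
    pg (aset par x v) x = v := by
  have hx : x.toNat < par.size := by omega
  unfold pg aset
  rw [if_pos h0, aget_eq_getElem _ _ h0 (by simpa using hx)]
  exact Array.getElem_setIfInBounds_self _

theorem pg_set_ne (par : Array Int) (x v y : Int) (hx0 : 0 ≤ x) (hy0 : 0 ≤ y) (h : y ≠ x) :
    pg (aset par x v) y = pg par y := by
  unfold pg aset
  rw [if_pos hx0]
  have hne : x.toNat ≠ y.toNat := by omega
  by_cases hy : y.toNat < par.size
  · rw [aget_eq_getElem _ _ hy0 (by simpa using hy), aget_eq_getElem _ _ hy0 hy]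
    rw [Array.getElem_setIfInBounds_ne]
    omega
  · rw [aget_of_oob _ _ hy0 (by simpa using hy), aget_of_oob _ _ hy0 hy]

theorem reach_det {par : Array Int} {k j : Nat} {x r s : Int}
    (h1 : ReachN par k x r) (h2 : ReachN par j x s) : k = j ∧ r = s := by
  induction h1 generalizing j s with
  | root x h0 hx1 hr =>
    cases h2 with
    | root => exact ⟨rfl, rfl⟩
    | step _ _ _ _ _ hp _ => exact absurd hr hp
  | step x r k h0 hx1 hp hrec ih =>
    cases h2 with
    | root _ _ _ hr => exact absurd hr hp
    | step _ _ k' _ _ _ hrec' =>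
      obtain ⟨hk, hr⟩ := ih hrec'
      exact ⟨by omega, hr⟩

theorem rootof_det {par : Array Int} {x r s : Int}
    (h1 : RootOf par x r) (h2 : RootOf par x s) : r = s := by
  obtain ⟨k, h1⟩ := h1
  obtain ⟨j, h2⟩ := h2
  exact (reach_det h1 h2).2

theorem reach_root_prop {par : Array Int} {k : Nat} {x r : Int} (h : ReachN par k x r) :
    0 ≤ r ∧ r < (par.size : Int) ∧ pg par r = -1 := by
  induction h with
  | root x h0 h1 hr => exact ⟨h0, h1, hr⟩
  | step x r k h0 h1 hp hrec ih => exact ih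

theorem reach_self_bounds {par : Array Int} {k : Nat} {x r : Int} (h : ReachN par k x r) :
    0 ≤ x ∧ x < (par.size : Int) := by
  cases h with
  | root x h0 h1 hr => exact ⟨h0, h1⟩
  | step x r k h0 h1 hp hrec => exact ⟨h0, h1⟩

theorem reach_chain {par : Array Int} {k : Nat} {x r : Int} (h : ReachN par k x r) :
    ∃ l : List Int, l.length = k + 1 ∧ l.Nodup ∧
      (∀ y ∈ l, 0 ≤ y ∧ y < (par.size : Int)) ∧
      (∀ y ∈ l, ∃ j, j ≤ k ∧ ReachN par j y r) := by
  induction h with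
  | root x h0 h1 hr =>
    refine ⟨[x], rfl, List.nodup_singleton x, ?_, ?_⟩
    · intro y hy; rw [List.mem_singleton] at hy; subst hy; exact ⟨h0, h1⟩
    · intro y hy; rw [List.mem_singleton] at hy; subst hy
      exact ⟨0, le_refl _, ReachN.root _ h0 h1 hr⟩
  | step x r k h0 h1 hp hrec ih =>
    obtain ⟨l, hlen, hnd, hbd, hder⟩ := ih
    refine ⟨x :: l, by simp [hlen], ?_, ?_, ?_⟩
    · refine List.nodup_cons.mpr ⟨?_, hnd⟩
      intro hx
      obtain ⟨j, hj, hd⟩ := hder x hx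
      have := (reach_det (ReachN.step x r k h0 h1 hp hrec) hd).1
      omega
    · intro y hy
      rcases List.mem_cons.mp hy with h | h
      · subst h; exact ⟨h0, h1⟩
      · exact hbd y h
    · intro y hy
      rcases List.mem_cons.mp hy with h | h
      · subst h; exact ⟨k + 1, le_refl _, ReachN.step _ _ _ h0 h1 hp hrec⟩
      · obtain ⟨j, hj, hd⟩ := hder y h
        exact ⟨j, by omega, hd⟩

theorem reach_lt {par : Array Int} {k : Nat} {x r : Int} (h : ReachN par k x r) :
    k < par.size := by
  obtain ⟨l, hlen, hnd, hbd, -⟩ := reach_chain h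
  have hsub : l ⊆ PySem.List.pyRange 0 (par.size : Int) 1 := by
    intro y hy
    rw [PySem.List.mem_pyRange_one]
    exact ⟨(hbd y hy).1, (hbd y hy).2⟩
  have := (List.subperm_of_subset hnd hsub).length_le
  rw [PySem.List.length_pyRange_one] at this
  omega

-- path compression: redirecting a non-root x straight to its root changes no root
theorem redirect {par : Array Int} {x r : Int} (hx : RootOf par x r) (hp : pg par x ≠ -1)
    (hx0 : 0 ≤ x) :
    ∀ y s, RootOf par y s ↔ RootOf (aset par x r) y s := by
  obtain ⟨kx, hkx⟩ := hx
  obtain ⟨hr0, hr1, hrroot⟩ := reach_root_prop hkx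
  have hxb := reach_self_bounds hkx
  have hxr : x ≠ r := fun h => hp (h ▸ hrroot)
  have hlen : (aset par x r).size = par.size := size_aset _ _ _
  have hpg2x : pg (aset par x r) x = r := pg_set_self _ _ _ hx0 hxb.2
  have hpg2 : ∀ y, 0 ≤ y → y ≠ x → pg (aset par x r) y = pg par y :=
    fun y hy0 hyx => pg_set_ne _ _ _ _ hx0 hy0 hyx
  have hroot2 : ReachN (aset par x r) 0 r r :=
    ReachN.root _ hr0 (by rw [hlen]; exact hr1)
      (by rw [hpg2 r hr0 (Ne.symm hxr)]; exact hrroot)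
  have fwd : ∀ k y s, ReachN par k y s → RootOf (aset par x r) y s := by
    intro k y s hk
    induction hk with
    | root y h0 h1 hrt =>
      by_cases hyx : y = x
      · subst hyx; exact absurd hrt hp
      · exact ⟨0, ReachN.root _ h0 (by rw [hlen]; exact h1)
          (by rw [hpg2 _ h0 hyx]; exact hrt)⟩
    | step y s k h0 h1 hpy hrec ih =>
      by_cases hyx : y = x
      · subst hyx
        have hs : s = r := rootof_det ⟨_, ReachN.step _ _ _ h0 h1 hpy hrec⟩ ⟨kx, hkx⟩
        subst hs
        exact ⟨1, ReachN.step _ _ _ hx0 (by rw [hlen]; exact h1)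
          (by rw [hpg2x]; omega) (by rw [hpg2x]; exact hroot2)⟩
      · obtain ⟨j, hj⟩ := ih
        exact ⟨j + 1, ReachN.step _ _ _ h0 (by rw [hlen]; exact h1)
          (by rw [hpg2 _ h0 hyx]; exact hpy) (by rw [hpg2 _ h0 hyx]; exact hj)⟩
  have bwd : ∀ k y s, ReachN (aset par x r) k y s → RootOf par y s := by
    intro k y s hk
    induction hk with
    | root y h0 h1 hrt =>
      by_cases hyx : y = x
      · subst hyx; rw [hpg2x] at hrt; exact absurd hrt (by omega)
      · exact ⟨0, ReachN.root _ h0 (by rw [hlen] at h1; exact h1)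
          (by rw [hpg2 _ h0 hyx] at hrt; exact hrt)⟩
    | step y s k h0 h1 hpy hrec ih =>
      by_cases hyx : y = x
      · have hrec' : ReachN (aset par x r) k r s := by
          rw [hyx, hpg2x] at hrec; exact hrec
        have hs : s = r := (reach_det hrec' hroot2).2
        rw [hyx, hs]
        exact ⟨kx, hkx⟩
      · obtain ⟨j, hj⟩ := ih
        have hj' : ReachN par j (pg par y) s := by
          rw [hpg2 _ h0 hyx] at hj; exact hj
        exact ⟨j + 1, ReachN.step _ _ _ h0 (by rw [hlen] at h1; exact h1)
          (by rw [hpg2 _ h0 hyx] at hpy; exact hpy) hj'⟩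
  intro y s
  exact ⟨fun ⟨k, hk⟩ => fwd k y s hk, fun ⟨k, hk⟩ => bwd k y s hk⟩

theorem findA_spec {par : Array Int} {k : Nat} {x r : Int} (h : ReachN par k x r) :
    ∀ fuel, k < fuel →
      (findA fuel par x).1 = r ∧ (findA fuel par x).2.size = par.size ∧
      (∀ y s, RootOf par y s ↔ RootOf (findA fuel par x).2 y s) ∧
      (∀ y, 0 ≤ y → (pg (findA fuel par x).2 y = -1 ↔ pg par y = -1)) := by
  induction h with
  | root x h0 h1 hr =>
    intro fuel hf
    match fuel, hf with
    | f + 1, _ =>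
      have hr' : aget par x = -1 := hr
      simp only [findA, hr', if_pos]
      exact ⟨trivial, trivial, fun y s => trivial, fun y _ => trivial⟩
  | step x r k h0 h1 hp hrec ih =>
    intro fuel hf
    match fuel, hf with
    | f + 1, hf =>
      have hkf : k < f := by omega
      obtain ⟨ih1, ih2, ih3, ih4⟩ := ih f hkf
      simp only [pg] at ih1 ih2 ih3 ih4
      have hr0 : 0 ≤ r := (reach_root_prop hrec).1
      have horig : ReachN par (k + 1) x r := ReachN.step _ _ _ h0 h1 hp hrec
      have hp' : ¬ (aget par x = -1) := hp
      simp only [findA, hp', if_false]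
      set rp := findA f par (aget par x) with hrp
      have hrp1 : rp.1 = r := ih1
      have hx2 : x < ((rp.2).size : Int) := by rw [ih2]; exact h1
      have hsetself : pg (aset rp.2 x rp.1) x = rp.1 :=
        pg_set_self _ _ _ h0 hx2
      have hroot2 : RootOf rp.2 x r := (ih3 x r).mp ⟨k + 1, horig⟩
      have hpg2x : pg rp.2 x ≠ -1 := fun hcon => hp ((ih4 x h0).mp hcon)
      have hred := redirect hroot2 hpg2x h0
      refine ⟨?_, ?_, ?_, ?_⟩
      · show pg (aset rp.2 x rp.1) x = r
        rw [hsetself, hrp1]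
      · show (aset rp.2 x rp.1).size = par.size
        rw [size_aset, ih2]
      · intro y s
        rw [hrp1]
        exact (ih3 y s).trans (hred y s)
      · intro y hy0
        by_cases hyx : y = x
        · subst hyx
          rw [hrp1] at hsetself ⊢
          constructor
          · intro hcon; rw [hsetself] at hcon; omega
          · intro hcon; exact absurd hcon hp
        · show pg (aset rp.2 x rp.1) y = -1 ↔ pg par y = -1
          rw [pg_set_ne _ _ _ _ h0 hy0 hyx]
          exact ih4 y hy0

-- linking root a under root b
theorem link {par : Array Int} {a b : Int} (ha : pg par a = -1) (hb : pg par b = -1)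
    (hab : a ≠ b) (ha0 : 0 ≤ a) (ha1 : a < (par.size : Int)) (hb0 : 0 ≤ b)
    (hb1 : b < (par.size : Int)) :
    ∀ y s', RootOf (aset par a b) y s' ↔
      ∃ s, RootOf par y s ∧ s' = (if s = a then b else s) := by
  have hlen : (aset par a b).size = par.size := size_aset _ _ _
  have hpg2a : pg (aset par a b) a = b := pg_set_self _ _ _ ha0 ha1
  have hpg2 : ∀ y, 0 ≤ y → y ≠ a → pg (aset par a b) y = pg par y :=
    fun y hy0 hya => pg_set_ne _ _ _ _ ha0 hy0 hya
  have hbroot2 : ReachN (aset par a b) 0 b b :=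
    ReachN.root _ hb0 (by rw [hlen]; exact hb1)
      (by rw [hpg2 b hb0 (Ne.symm hab)]; exact hb)
  have fwd : ∀ k y s', ReachN (aset par a b) k y s' →
      ∃ s, RootOf par y s ∧ s' = (if s = a then b else s) := by
    intro k y s' hk
    induction hk with
    | root y h0 h1 hrt =>
      by_cases hya : y = a
      · subst hya; rw [hpg2a] at hrt; exact absurd hrt (by omega)
      · exact ⟨y, ⟨0, ReachN.root _ h0 (by rw [hlen] at h1; exact h1)
          (by rw [hpg2 _ h0 hya] at hrt; exact hrt)⟩, by rw [if_neg hya]⟩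
    | step y s' k h0 h1 hpy hrec ih =>
      by_cases hya : y = a
      · have hrec' : ReachN (aset par a b) k b s' := by
          rw [hya, hpg2a] at hrec; exact hrec
        have hs : s' = b := (reach_det hrec' hbroot2).2
        rw [hya, hs]
        exact ⟨a, ⟨0, ReachN.root _ ha0 ha1 ha⟩, by rw [if_pos rfl]⟩
      · obtain ⟨s0, hs0, heq⟩ := ih
        obtain ⟨j, hj⟩ := hs0
        have hjj : ReachN par j (pg par y) s0 := by
          rw [hpg2 _ h0 hya] at hj; exact hj
        exact ⟨s0, ⟨j + 1, ReachN.step _ _ _ h0 (by rw [hlen] at h1; exact h1)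
          (by rw [hpg2 _ h0 hya] at hpy; exact hpy) hjj⟩, heq⟩
  have bwd : ∀ k y s, ReachN par k y s →
      RootOf (aset par a b) y (if s = a then b else s) := by
    intro k y s hk
    induction hk with
    | root y h0 h1 hrt =>
      by_cases hya : y = a
      · subst hya
        rw [if_pos rfl]
        exact ⟨1, ReachN.step _ _ _ ha0 (by rw [hlen]; exact ha1)
          (by rw [hpg2a]; omega) (by rw [hpg2a]; exact hbroot2)⟩
      · rw [if_neg hya]
        exact ⟨0, ReachN.root _ h0 (by rw [hlen]; exact h1)
          (by rw [hpg2 _ h0 hya]; exact hrt)⟩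
    | step y s k h0 h1 hpy hrec ih =>
      have hya : y ≠ a := fun h => hpy (h ▸ ha)
      obtain ⟨j, hj⟩ := ih
      exact ⟨j + 1, ReachN.step _ _ _ h0 (by rw [hlen]; exact h1)
        (by rw [hpg2 _ h0 hya]; exact hpy) (by rw [hpg2 _ h0 hya]; exact hj)⟩
  intro y s'
  constructor
  · rintro ⟨k, hk⟩
    exact fwd k y s' hk
  · rintro ⟨s, ⟨k, hk⟩, rfl⟩
    exact bwd k y s hk

theorem sameroot_iff {par : Array Int} {u v su sv : Int}
    (hsu : RootOf par u su) (hsv : RootOf par v sv) :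
    SameRoot par u v ↔ su = sv := by
  constructor
  · rintro ⟨t, htu, htv⟩
    rw [rootof_det hsu htu, rootof_det hsv htv]
  · intro h; exact ⟨su, hsu, h ▸ hsv⟩

theorem fcollapse {a b su sv : Int} :
    ((if su = a then b else su) = (if sv = a then b else sv)) ↔
      (su = sv ∨ (su = a ∧ sv = b) ∨ (su = b ∧ sv = a)) := by
  split_ifs <;> omega

-- the two finds at the head of union (also the body of the final loop)
theorem find2_spec {N : Nat} {par : Array Int} {g : Int → Int} (hI : INV N par g)
    {x y : Int} (hx0 : 0 ≤ x) (hx1 : x < (N : Int)) (hy0 : 0 ≤ y) (hy1 : y < (N : Int)) :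
    ∃ rx ry,
      RootOf par x rx ∧ RootOf par y ry ∧
      (findA par.size par x).1 = rx ∧
      (findA (findA par.size par x).2.size (findA par.size par x).2 y).1 = ry ∧
      INV N (findA (findA par.size par x).2.size (findA par.size par x).2 y).2 g ∧
      (∀ u s, RootOf par u s ↔
        RootOf (findA (findA par.size par x).2.size (findA par.size par x).2 y).2 u s) ∧
      (rx = ry ↔ g x = g y) := by
  obtain ⟨hlen, hwf, hrel⟩ := hI
  obtain ⟨rx, hrx⟩ := hwf x hx0 (by rw [hlen]; exact hx1)
  obtain ⟨ry, hry⟩ := hwf y hy0 (by rw [hlen]; exact hy1)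
  obtain ⟨kx, hkx⟩ := hrx
  obtain ⟨f1, f2, f3, f4⟩ := findA_spec hkx par.size (reach_lt hkx)
  have hry1 : RootOf (findA par.size par x).2 y ry := (f3 y ry).mp hry
  obtain ⟨ky, hky⟩ := hry1
  obtain ⟨g1, g2, g3, g4⟩ := findA_spec hky (findA par.size par x).2.size (reach_lt hky)
  have hlen2 : (findA (findA par.size par x).2.size (findA par.size par x).2 y).2.size = N := by
    rw [g2, f2, hlen]
  have hiff : ∀ u s, RootOf par u s ↔
      RootOf (findA (findA par.size par x).2.size (findA par.size par x).2 y).2 u s :=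
    fun u s => (f3 u s).trans (g3 u s)
  refine ⟨rx, ry, ⟨kx, hkx⟩, hry, f1, g1, ⟨hlen2, ?_, ?_⟩, hiff, ?_⟩
  · intro u hu0 hu1
    rw [hlen2] at hu1
    obtain ⟨s, hs⟩ := hwf u hu0 (by rw [hlen]; exact hu1)
    exact ⟨s, (hiff u s).mp hs⟩
  · intro u v hu0 hu1 hv0 hv1
    rw [← hrel u v hu0 hu1 hv0 hv1]
    constructor
    · rintro ⟨t, htu, htv⟩
      exact ⟨t, (hiff u t).mpr htu, (hiff v t).mpr htv⟩
    · rintro ⟨t, htu, htv⟩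
      exact ⟨t, (hiff u t).mp htu, (hiff v t).mp htv⟩
  · rw [← hrel x y hx0 hx1 hy0 hy1]
    exact (sameroot_iff ⟨kx, hkx⟩ hry).symm

set_option maxHeartbeats 1000000 in
theorem link_inv {N : Nat} {par : Array Int} {g : Int → Int} {x y rx ry a b : Int}
    (hI : INV N par g) (hx0 : 0 ≤ x) (hx1 : x < (N : Int)) (hy0 : 0 ≤ y) (hy1 : y < (N : Int))
    (hrx : RootOf par x rx) (hry : RootOf par y ry) (hne : rx ≠ ry)
    (hab : (a = rx ∧ b = ry) ∨ (a = ry ∧ b = rx)) :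
    INV N (aset par a b) (gmerge g x y) := by
  obtain ⟨hlen, hwf, hrel⟩ := hI
  obtain ⟨krx, hkrx⟩ := hrx
  obtain ⟨kry, hkry⟩ := hry
  obtain ⟨hrx0, hrx1, hrxr⟩ := reach_root_prop hkrx
  obtain ⟨hry0, hry1, hryr⟩ := reach_root_prop hkry
  have hgne : ¬ (g x = g y) := by
    rw [← hrel x y hx0 hx1 hy0 hy1]
    rw [sameroot_iff ⟨krx, hkrx⟩ ⟨kry, hkry⟩]
    exact hne
  have hanb : a ≠ b := by rcases hab with ⟨rfl, rfl⟩ | ⟨rfl, rfl⟩ <;> omega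
  have ha : pg par a = -1 := by rcases hab with ⟨rfl, -⟩ | ⟨rfl, -⟩ <;> assumption
  have hb : pg par b = -1 := by rcases hab with ⟨-, rfl⟩ | ⟨-, rfl⟩ <;> assumption
  have ha0 : 0 ≤ a := by rcases hab with ⟨rfl, -⟩ | ⟨rfl, -⟩ <;> assumption
  have hb0 : 0 ≤ b := by rcases hab with ⟨-, rfl⟩ | ⟨-, rfl⟩ <;> assumption
  have ha1 : a < (par.size : Int) := by rcases hab with ⟨rfl, -⟩ | ⟨rfl, -⟩ <;> assumption
  have hb1 : b < (par.size : Int) := by rcases hab with ⟨-, rfl⟩ | ⟨-, rfl⟩ <;> assumption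
  have hlink := link ha hb hanb ha0 ha1 hb0 hb1
  refine ⟨by rw [size_aset, hlen], ?_, ?_⟩
  · intro u hu0 hu1
    rw [size_aset] at hu1
    obtain ⟨s, hs⟩ := hwf u hu0 hu1
    exact ⟨if s = a then b else s, (hlink u _).mpr ⟨s, hs, rfl⟩⟩
  · intro u v hu0 hu1 hv0 hv1
    obtain ⟨su, hsu⟩ := hwf u hu0 (by rw [hlen]; exact hu1)
    obtain ⟨sv, hsv⟩ := hwf v hv0 (by rw [hlen]; exact hv1)
    have h1 : SameRoot (aset par a b) u v ↔
        ((if su = a then b else su) = (if sv = a then b else sv)) := by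
      constructor
      · rintro ⟨t, htu, htv⟩
        obtain ⟨s1, hs1, ht1⟩ := (hlink u t).mp htu
        obtain ⟨s2, hs2, ht2⟩ := (hlink v t).mp htv
        rw [rootof_det hsu hs1, rootof_det hsv hs2, ← ht1, ← ht2]
      · intro h
        exact ⟨if su = a then b else su, (hlink u _).mpr ⟨su, hsu, rfl⟩,
          h ▸ (hlink v _).mpr ⟨sv, hsv, rfl⟩⟩
    rw [h1, fcollapse]
    have e_uv : su = sv ↔ g u = g v := by
      rw [← hrel u v hu0 hu1 hv0 hv1]; exact (sameroot_iff hsu hsv).symm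
    have e_ux : su = rx ↔ g u = g x := by
      rw [← hrel u x hu0 hu1 hx0 hx1]; exact (sameroot_iff hsu ⟨krx, hkrx⟩).symm
    have e_uy : su = ry ↔ g u = g y := by
      rw [← hrel u y hu0 hu1 hy0 hy1]; exact (sameroot_iff hsu ⟨kry, hkry⟩).symm
    have e_vx : sv = rx ↔ g v = g x := by
      rw [← hrel v x hv0 hv1 hx0 hx1]; exact (sameroot_iff hsv ⟨krx, hkrx⟩).symm
    have e_vy : sv = ry ↔ g v = g y := by
      rw [← hrel v y hv0 hv1 hy0 hy1]; exact (sameroot_iff hsv ⟨kry, hkry⟩).symm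
    have h2 : gmerge g x y u = gmerge g x y v ↔
        (g u = g v ∨ (g u = g x ∧ g v = g y) ∨ (g u = g y ∧ g v = g x)) := by
      simp only [gmerge, if_neg hgne]
      split_ifs <;> omega
    rw [h2]
    clear h1 h2 hlink hwf hrel hkrx hkry hsu hsv hrxr hryr ha hb hgne
    rcases hab with ⟨rfl, rfl⟩ | ⟨rfl, rfl⟩ <;> tauto

theorem union_inv {N : Nat} {par : Array Int} {g : Int → Int} (hI : INV N par g)
    {x y : Int} (hx0 : 0 ≤ x) (hx1 : x < (N : Int)) (hy0 : 0 ≤ y) (hy1 : y < (N : Int))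
    (rank : Array Int) :
    INV N (unionA rank par x y).2 (gmerge g x y) := by
  obtain ⟨rx, ry, hrx, hry, e1, e2, hIb, hiff, hgiff⟩ := find2_spec hI hx0 hx1 hy0 hy1
  have hrx1 : RootOf (findA (findA par.size par x).2.size (findA par.size par x).2 y).2 x rx :=
    (hiff x rx).mp hrx
  have hry1 : RootOf (findA (findA par.size par x).2.size (findA par.size par x).2 y).2 y ry :=
    (hiff y ry).mp hry
  simp only [unionA]
  rw [e1, e2]
  by_cases hxy : rx = ry
  · rw [if_pos hxy]
    have hgxy : g x = g y := hgiff.mp hxy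
    have hpt : ∀ u v : Int, (g u = g v) ↔ (gmerge g x y u = gmerge g x y v) := by
      intro u v; simp [gmerge, hgxy]
    obtain ⟨l1, w1, r1⟩ := hIb
    exact ⟨l1, w1, fun u v hu0 hu1 hv0 hv1 => (r1 u v hu0 hu1 hv0 hv1).trans (hpt u v)⟩
  · rw [if_neg hxy]
    split_ifs with h1 h2
    · exact link_inv hIb hx0 hx1 hy0 hy1 hrx1 hry1 hxy (Or.inr ⟨rfl, rfl⟩)
    · exact link_inv hIb hx0 hx1 hy0 hy1 hrx1 hry1 hxy (Or.inl ⟨rfl, rfl⟩)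
    · exact link_inv hIb hx0 hx1 hy0 hy1 hrx1 hry1 hxy (Or.inl ⟨rfl, rfl⟩)

theorem getD_reprA {n u : Int} (g : Int → Int) (h0 : 0 ≤ u) (h1 : u < n) :
    aget (reprA n g) u = g u := by
  have hlt : u.toNat < ((PySem.List.pyRange 0 n 1).map g).length := by
    rw [List.length_map, PySem.List.length_pyRange_one]; omega
  unfold reprA
  rw [aget_eq_getElem _ _ h0 (by simpa using hlt), List.getElem_toArray, List.getElem_map,
    PySem.List.getElem_pyRange_one _ _ _ (by simpa using hlt)]
  congr 1
  omega

theorem mergeB_repr {n : Int} {g : Int → Int} {x p : Int}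
    (hx0 : 0 ≤ x) (hx1 : x < n) (hp0 : 0 ≤ p) (hp1 : p < n) :
    mergeB (reprA n g) x p = reprA n (gmerge g x p) := by
  unfold mergeB
  rw [getD_reprA g hx0 hx1, getD_reprA g hp0 hp1]
  by_cases hne : g x = g p
  · rw [if_neg (by simpa using hne)]
    unfold reprA
    congr 1
    exact (List.map_congr_left (fun v _ => by simp [gmerge, hne])).symm
  · rw [if_pos (by simpa using hne)]
    show ((PySem.List.pyRange 0 n 1).map g).toArray.map _ = _
    rw [List.map_toArray, List.map_map]
    unfold reprA
    congr 1
    exact List.map_congr_left (fun v _ => by simp [gmerge, hne])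

theorem comp0_repr (n : Int) :
    ((PySem.List.pyRange 0 n 1).map (fun v => v)).toArray = reprA n (fun u => u) := rfl

def SieveP (n : Int) (spf : Array Int) : Prop :=
  spf.size = n.toNat ∧ ∀ m : Int, 0 ≤ m → m < n →
    0 ≤ pg spf m ∧ pg spf m ≤ m ∧ (1 < m → 2 ≤ pg spf m)

theorem sieve_step (n i : Int) (hi : 2 ≤ i) {s : Array Int} {j : Int}
    (hj : i ≤ j) (hjn : j < n) (hP : SieveP n s) :
    SieveP n (if aget s j = j then aset s j i else s) := by
  split_ifs with hc
  · obtain ⟨hl, hv⟩ := hP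
    have hj0 : 0 ≤ j := by omega
    refine ⟨by rw [size_aset]; exact hl, ?_⟩
    intro m hm0 hm1
    by_cases hmj : m = j
    · subst hmj
      have : pg (aset s m i) m = i :=
        pg_set_self _ _ _ hm0 (by rw [hl]; omega)
      rw [this]
      exact ⟨by omega, hj, fun _ => hi⟩
    · have : pg (aset s j i) m = pg s m := pg_set_ne _ _ _ _ hj0 hm0 hmj
      rw [this]
      exact hv m hm0 hm1
  · exact hP

theorem sieve_inner (n i : Int) (hi : 2 ≤ i) :
    ∀ (l : List Int) (s : Array Int), (∀ j ∈ l, i ≤ j ∧ j < n) → SieveP n s →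
      SieveP n (l.foldl (fun s j =>
        if aget s j = j then aset s j i else s) s) := by
  intro l
  induction l with
  | nil => intro s _ hP; exact hP
  | cons j t ih =>
    intro s hmem hP
    rw [List.foldl_cons]
    exact ih _ (fun j' hj' => hmem j' (List.mem_cons_of_mem _ hj'))
      (sieve_step n i hi (hmem j (List.mem_cons_self)).1 (hmem j (List.mem_cons_self)).2 hP)

theorem sieve_outer (n : Int) :
    ∀ (l : List Int) (s : Array Int), (∀ i ∈ l, 2 ≤ i) → SieveP n s →
      SieveP n (l.foldl (fun spf i =>
        if aget spf i ≠ i then spf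
        else (PySem.List.pyRange (i*i) n i).foldl (fun s j =>
            if aget s j = j then aset s j i else s) spf) s) := by
  intro l
  induction l with
  | nil => intro s _ hP; exact hP
  | cons i t ih =>
    intro s hmem hP
    rw [List.foldl_cons]
    refine ih _ (fun i' hi' => hmem i' (List.mem_cons_of_mem _ hi')) ?_
    have hi : 2 ≤ i := hmem i List.mem_cons_self
    split_ifs with hc
    · exact hP
    · refine sieve_inner n i hi _ s ?_ hP
      intro j hj
      have hj' := (PySem.List.mem_pyRange_iff_of_pos (by omega) j).mp hj
      have hii : i ≤ i * i := le_mul_of_one_le_left (by omega) (by omega)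
      exact ⟨by omega, hj'.2.1⟩

theorem sieveP_init (n : Int) : SieveP n (PySem.List.pyRange 0 n 1).toArray := by
  constructor
  · rw [List.size_toArray, PySem.List.length_pyRange_one]; omega
  · intro m hm0 hm1
    have hlt : m.toNat < (PySem.List.pyRange 0 n 1).length := by
      rw [PySem.List.length_pyRange_one]; omega
    have hv : pg (PySem.List.pyRange 0 n 1).toArray m = m := by
      unfold pg
      rw [aget_eq_getElem _ _ hm0 (by simpa using hlt), List.getElem_toArray,
        PySem.List.getElem_pyRange_one _ _ _ hlt]
      omega
    rw [hv]
    exact ⟨hm0, le_refl m, fun h => by omega⟩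

theorem sieve_ok (n : Int) : spfOK (sieveA n) n := by
  have h : SieveP n (sieveA n) := by
    unfold sieveA
    refine sieve_outer n _ _ ?_ (sieveP_init n)
    intro i hi
    exact (PySem.List.mem_pyRange_one.mp hi).1
  intro m hm1 hmn
  obtain ⟨-, hv⟩ := h
  obtain ⟨h1, h2, h3⟩ := hv m (by omega) hmn
  exact ⟨h3 hm1, h2⟩

theorem factor_lockstep {N : Nat} {n : Int} (hn : (N : Int) = n) {spf : Array Int}
    (hspf : spfOK spf n) :
    ∀ (fuel : Nat) (num : Int) (st : Array Int × Array Int) (g : Int → Int) (x : Int),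
      INV N st.2 g → 0 ≤ x → x < (N : Int) → 0 ≤ num → num < (N : Int) →
      ∃ g', INV N (factorUnionA spf fuel st x num).2 g' ∧
        factorMergeB spf fuel (reprA n g) x num = reprA n g' := by
  intro fuel
  induction fuel with
  | zero => intro num st g x hI _ _ _ _; exact ⟨g, hI, rfl⟩
  | succ f ih =>
    intro num st g x hI hx0 hx1 hnum0 hnum1
    by_cases hguard : 1 < num
    · have hsp := hspf num hguard (by omega)
      simp only [pg] at hsp
      have hp0 : 0 ≤ aget spf num := by omega
      have hp1 : aget spf num < (N : Int) := by omega
      have hI2 := union_inv hI hx0 hx1 hp0 hp1 st.1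
      have hmrg := mergeB_repr (n := n) (g := g) hx0 (by omega) hp0 (by omega)
      have hq0 : 0 ≤ PySem.Int.floordiv num (aget spf num) := by
        rw [PySem.Int.floordiv_eq_ediv_of_pos (by omega)]
        exact Int.ediv_nonneg (by omega) (by omega)
      have hq1 : PySem.Int.floordiv num (aget spf num) < (N : Int) := by
        rw [PySem.Int.floordiv_eq_ediv_of_pos (by omega)]
        have := Int.ediv_le_self (aget spf num) (show (0:Int) ≤ num by omega)
        omega
      obtain ⟨g2, h1, h2⟩ := ih (PySem.Int.floordiv num (aget spf num))
        (unionA st.1 st.2 x (aget spf num)) (gmerge g x (aget spf num))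
        x hI2 hx0 hx1 hq0 hq1
      refine ⟨g2, ?_, ?_⟩
      · simp only [factorUnionA, if_pos hguard]
        exact h1
      · simp only [factorMergeB, if_pos hguard]
        rw [hmrg]
        exact h2
    · simp only [factorUnionA, factorMergeB, if_neg hguard]
      exact ⟨g, hI, rfl⟩

theorem fold_lockstep {N : Nat} {n : Int} (hn : (N : Int) = n) {spf : Array Int}
    (hspf : spfOK spf n) :
    ∀ (l : List Int) (st : Array Int × Array Int) (g : Int → Int),
      INV N st.2 g → (∀ x ∈ l, 0 ≤ x ∧ x < (N : Int)) →
      ∃ g', INV N (l.foldl (fun st x => factorUnionA spf (x.toNat + 1) st x x) st).2 g' ∧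
        l.foldl (fun c x => factorMergeB spf (x.toNat + 1) c x x) (reprA n g) = reprA n g' := by
  intro l
  induction l with
  | nil => intro st g hI _; exact ⟨g, hI, rfl⟩
  | cons x t ih =>
    intro st g hI hmem
    obtain ⟨hx0, hx1⟩ := hmem x List.mem_cons_self
    obtain ⟨g1, hI1, hB1⟩ := factor_lockstep hn hspf (x.toNat + 1) x st g x hI hx0 hx1 hx0 hx1
    obtain ⟨g2, hI2, hB2⟩ := ih (factorUnionA spf (x.toNat + 1) st x x) g1 hI1
      (fun y hy => hmem y (List.mem_cons_of_mem _ hy))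
    refine ⟨g2, hI2, ?_⟩
    rw [List.foldl_cons, hB1]
    exact hB2

theorem check_lockstep {N : Nat} {n : Int} (hn : (N : Int) = n) :
    ∀ (pairs : List (Int × Int)) (par : Array Int) (g : Int → Int),
      INV N par g →
      (∀ p ∈ pairs, 0 ≤ p.1 ∧ p.1 < (N : Int) ∧ 0 ≤ p.2 ∧ p.2 < (N : Int)) →
      checkA pairs par =
        pairs.all (fun xy => aget (reprA n g) xy.1 == aget (reprA n g) xy.2) := by
  intro pairs
  induction pairs with
  | nil => intro par g _ _; rfl
  | cons p rest ih =>
    intro par g hI hmem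
    obtain ⟨x, y⟩ := p
    obtain ⟨hx0, hx1, hy0, hy1⟩ := hmem (x, y) List.mem_cons_self
    obtain ⟨rx, ry, hrx, hry, e1, e2, hIb, hiff, hgiff⟩ := find2_spec hI hx0 hx1 hy0 hy1
    have hgdx : aget (reprA n g) x = g x := getD_reprA g hx0 (by omega)
    have hgdy : aget (reprA n g) y = g y := getD_reprA g hy0 (by omega)
    rw [List.all_cons]
    simp only [checkA, hgdx, hgdy]
    rw [e1, e2]
    by_cases hg : g x = g y
    · rw [if_neg (by simpa using hgiff.mpr hg)]
      rw [ih _ g hIb (fun q hq => hmem q (List.mem_cons_of_mem _ hq))]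
      simp [hg]
    · rw [if_pos (by simpa using fun hcon => hg (hgiff.mp hcon))]
      have hfalse : (g x == g y) = false := by simpa using hg
      rw [hfalse]
      simp

theorem init_inv (N : Nat) :
    INV N (Array.replicate N (-1)) (fun u => u) := by
  have hlen : (Array.replicate N (-1 : Int)).size = N := Array.size_replicate
  have hpg : ∀ u : Int, 0 ≤ u → u < (N : Int) → pg (Array.replicate N (-1 : Int)) u = -1 := by
    intro u h0 h1
    unfold pg
    rw [aget_eq_getElem _ _ h0 (by simpa using (by omega : u.toNat < N))]
    simp
  have hroot : ∀ u : Int, 0 ≤ u → u < (N : Int) → ReachN (Array.replicate N (-1 : Int)) 0 u u :=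
    fun u h0 h1 => ReachN.root _ h0 (by rw [hlen]; exact h1) (hpg u h0 h1)
  have hdet : ∀ (k : Nat) (y s : Int), ReachN (Array.replicate N (-1 : Int)) k y s → s = y := by
    intro k y s hk
    cases hk with
    | root => rfl
    | step y s k h0 h1 hp hrec => exact absurd (hpg y h0 (by rw [hlen] at h1; exact h1)) hp
  refine ⟨hlen, ?_, ?_⟩
  · intro u h0 h1
    rw [hlen] at h1
    exact ⟨u, 0, hroot u h0 h1⟩
  · intro u v hu0 hu1 hv0 hv1
    constructor
    · rintro ⟨t, ⟨k1, hd1⟩, ⟨k2, hd2⟩⟩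
      exact (hdet _ _ _ hd1).symm.trans (hdet _ _ _ hd2)
    · intro h
      have huv : u = v := h
      exact ⟨u, ⟨0, hroot u hu0 hu1⟩, ⟨0, huv ▸ hroot u hu0 hu1⟩⟩

theorem main_eq (nums : List Int) (m : Int) (hm0 : 0 ≤ m)
    (hmax : ∀ x ∈ nums, 0 ≤ x ∧ x ≤ m) :
    checkA (nums.zip (PySem.List.sorted nums (fun v => v)))
        (nums.foldl (fun st x => factorUnionA (sieveA (m+1)) (x.toNat + 1) st x x)
          (Array.replicate (m+1).toNat 0, Array.replicate (m+1).toNat (-1 : Int))).2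
      = (nums.zip (PySem.List.sorted nums (fun v => v))).all
          (fun xy =>
            aget (nums.foldl (fun c x => factorMergeB (sieveB (m+1)) (x.toNat + 1) c x x)
              (((PySem.List.pyRange 0 (m+1) 1).map (fun v => v)).toArray)) xy.1
            == aget (nums.foldl (fun c x => factorMergeB (sieveB (m+1)) (x.toNat + 1) c x x)
              (((PySem.List.pyRange 0 (m+1) 1).map (fun v => v)).toArray)) xy.2) := by
  have hn : (((m+1).toNat : Nat) : Int) = m + 1 := by omega
  rw [show sieveB = sieveA from rfl, comp0_repr]
  have hbounds : ∀ x ∈ nums, 0 ≤ x ∧ x < (((m+1).toNat : Nat) : Int) := by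
    intro x hx
    obtain ⟨h1, h2⟩ := hmax x hx
    exact ⟨h1, by omega⟩
  obtain ⟨g2, hI2, hB⟩ := fold_lockstep hn (sieve_ok (m+1)) nums
    (Array.replicate (m+1).toNat 0, Array.replicate (m+1).toNat (-1)) (fun u => u)
    (init_inv (m+1).toNat) hbounds
  rw [hB]
  refine check_lockstep hn _ _ g2 hI2 ?_
  intro p hp
  obtain ⟨x, y⟩ := p
  obtain ⟨hx, hy⟩ := List.of_mem_zip hp
  rw [PySem.List.mem_sorted] at hy
  exact ⟨(hbounds x hx).1, (hbounds x hx).2, (hbounds y hy).1, (hbounds y hy).2⟩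

-- ===== VERDICT (by name: the statement is the Claim_ definition above) =====
theorem gcdSort_spec : Claim_equal_gcdSort := by
  intro nums hdom hpre
  unfold Spec_gcdSort
  obtain ⟨hne, hpos⟩ := hpre
  obtain ⟨m, hm⟩ : ∃ m, PySem.List.max? nums (fun v => v) = some m := by
    cases h : PySem.List.max? nums (fun v => v) with
    | none => exact absurd ((PySem.List.max?_eq_none_iff _ _).mp h) hne
    | some m => exact ⟨m, rfl⟩
  have hm0 : 0 ≤ m := hpos m (PySem.List.max?_mem hm)
  have hmax : ∀ x ∈ nums, 0 ≤ x ∧ x ≤ m :=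
    fun x hx => ⟨hpos x hx, PySem.List.max?_isMax hm x hx⟩
  simp only [gcdSort, gcdSort_alt, hm, Option.getD_some]
  exact main_eq nums m hm0 hmax
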